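-- pv_equiv track=rewrite | github.com/ankithareddy12/TRAINING-JUNE | coins and even.py | longest_even_number
-- ===== SOURCE A (Python) =====
-- def longest_even_number(str1, str2):
--     digits1 = [char for char in str1 if char.isdigit()]
--     digits2 = [char for char in str2 if char.isdigit()]
--
--     unique_digits = list(set(digits1 + digits2))
--
--     unique_digits.sort(reverse=True)
--
--     dp = [["" for _ in range(2)] for _ in range(len(unique_digits) + 1)]
--
--     for i in range(1, len(unique_digits) + 1):
--         digit = unique_digits[i - 1]
--         for j in range(2):
--             dp[i][j] = dp[i - 1][j]
--             if j == 1 and int(digit) % 2 == 0: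
--                 dp[i][j] = max(dp[i][j], dp[i - 1][0] + digit)
--             elif j == 0:
--                 dp[i][j] = max(dp[i][j], dp[i - 1][j] + digit)
--
--     result = dp[len(unique_digits)][1]
--     return result if result else "No even number can be formed"
-- ===== SOURCE B (Python) =====
-- def longest_even_number(str1, str2):
--     digits = set(c for c in str1 + str2 if c.isdigit())
--     s = "".join(sorted(digits, reverse=True))
--     while s and int(s[-1]) % 2:
--         s = s[:-1]
--     return s if s else "No even number can be formed"
-- ===== Notes on version B (the rewrite author's own statement) =====
-- stated objective: simpler
-- what changed: Replaces the 2-column string DP over the descending unique digits by a direct greedy truncation: join the unique digits sorted descending and strip odd digits from the right; the DP's dp[n][1] is provably that string truncated after its last even digit.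
import Mathlib
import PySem

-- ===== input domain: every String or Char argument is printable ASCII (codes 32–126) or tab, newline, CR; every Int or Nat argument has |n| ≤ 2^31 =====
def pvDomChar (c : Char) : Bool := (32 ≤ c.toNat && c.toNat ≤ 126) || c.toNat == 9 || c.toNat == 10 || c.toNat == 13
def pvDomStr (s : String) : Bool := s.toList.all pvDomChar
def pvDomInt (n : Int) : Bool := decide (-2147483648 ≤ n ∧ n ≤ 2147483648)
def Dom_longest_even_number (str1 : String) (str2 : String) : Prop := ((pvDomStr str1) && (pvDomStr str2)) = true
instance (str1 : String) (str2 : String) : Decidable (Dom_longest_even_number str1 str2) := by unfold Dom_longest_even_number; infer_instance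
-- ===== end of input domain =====

-- B replaces A's 2-column string DP by a greedy right-to-left truncation of the
-- descending unique-digit string; objective: simpler. Strings are modelled as
-- List Char internally (Python lexicographic max = lexicographic < on List Char).

-- ===== PORT A =====
-- int(digit) for a one-char digit string; the `.getD 0` default is unreachable:
-- it is only applied to chars that passed isdigit, which are '0'..'9' on the ASCII domain.
def pvCharInt (c : Char) : Int := (PySem.Int.ofStr? (String.ofList [c])).getD 0

-- Python max(a, b) on strings: b iff b > a lexicographically.
def pvMax (a b : List Char) : List Char := if a < b then b else a

-- dp[i][j] read / write (indices are the loop's nonnegative ints, so pyGetD/pySetD are exact).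
def pvCell (dp : List (List (List Char))) (i j : Int) : List Char :=
  PySem.List.pyGetD (PySem.List.pyGetD dp i []) j []

def pvSetCell (dp : List (List (List Char))) (i j : Int) (v : List Char) : List (List (List Char)) :=
  PySem.List.pySetD dp i (PySem.List.pySetD (PySem.List.pyGetD dp i []) j v)

-- body of `for j in range(2)`
def pvStepJ (ud : List Char) (i : Int) (dp : List (List (List Char))) (j : Int) : List (List (List Char)) :=
  let digit := PySem.List.pyGetD ud (i - 1) ' '
  let dp := pvSetCell dp i j (pvCell dp (i - 1) j)
  if j == 1 && PySem.Int.mod (pvCharInt digit) 2 == 0 then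
    pvSetCell dp i j (pvMax (pvCell dp i j) (pvCell dp (i - 1) 0 ++ [digit]))
  else if j == 0 then
    pvSetCell dp i j (pvMax (pvCell dp i j) (pvCell dp (i - 1) j ++ [digit]))
  else dp

-- body of `for i in range(1, len(unique_digits) + 1)`
def pvStepI (ud : List Char) (dp : List (List (List Char))) (i : Int) : List (List (List Char)) :=
  (PySem.List.pyRange 0 2 1).foldl (pvStepJ ud i) dp

def longest_even_number (str1 : String) (str2 : String) : String :=
  let digits1 := str1.toList.filter PySem.Chars.isdigit
  let digits2 := str2.toList.filter PySem.Chars.isdigit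
  let unique_digits : List Char := PySem.Set.ofList (digits1 ++ digits2)
  let unique_digits := PySem.List.sorted unique_digits (fun c => c) true
  let n := unique_digits.length
  let dp : List (List (List Char)) := List.replicate (n + 1) (List.replicate 2 [])
  let dp := (PySem.List.pyRange 1 ((n : Int) + 1) 1).foldl (pvStepI unique_digits) dp
  let result := pvCell dp (n : Int) 1
  if result ≠ [] then String.ofList result else "No even number can be formed"

-- ===== PORT B =====
-- `while s and int(s[-1]) % 2: s = s[:-1]`
def pvTrim (s : List Char) : List Char :=
  if h : s ≠ [] ∧ PySem.Int.mod (pvCharInt ((PySem.List.pyGet? s (-1)).getD ' ')) 2 ≠ 0 then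
    pvTrim (PySem.List.slice s none (some (-1)))
  else s
termination_by s.length
decreasing_by
  simp only [PySem.List.slice_to_neg_one, List.length_dropLast]
  have := List.length_pos_iff.mpr h.1
  omega

def longest_even_number_alt (str1 : String) (str2 : String) : String :=
  let digits : PySem.Set Char := PySem.Set.ofList ((str1.toList ++ str2.toList).filter PySem.Chars.isdigit)
  let s := PySem.List.sorted (digits : List Char) (fun c => c) true
  let s := pvTrim s
  if s ≠ [] then String.ofList s else "No even number can be formed"

-- ===== PRECONDITION & SPEC =====
def Spec_longest_even_number (str1 : String) (str2 : String) (out : String) : Prop := out = longest_even_number_alt str1 str2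
instance (str1 : String) (str2 : String) (out : String) : Decidable (Spec_longest_even_number str1 str2 out) := by unfold Spec_longest_even_number; infer_instance

-- ===== CLAIM (what is proved, stated in full; the proofs are below) =====
def Claim_equal_longest_even_number : Prop := ∀ (str1 : String) (str2 : String), Dom_longest_even_number str1 str2 → Spec_longest_even_number str1 str2 (longest_even_number str1 str2)

-- ===== LEMMAS AND PROOFS =====

-- a proper prefix is lexicographically smaller (so Python string max picks the extension)
theorem pvLt_of_prefix : ∀ (a b : List Char), a <+: b → a ≠ b → a < b := by
  intro a
  induction a with
  | nil =>
    intro b _ hne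
    cases b with
    | nil => exact absurd rfl hne
    | cons x xs => exact List.nil_lt_cons x xs
  | cons x xs ih =>
    intro b hp hne
    cases b with
    | nil => exact absurd (List.prefix_nil.mp hp) hne
    | cons y ys =>
      obtain ⟨hxy, hp'⟩ := List.cons_prefix_cons.mp hp
      subst hxy
      exact List.cons_lt_cons_iff.mpr (Or.inr ⟨rfl, ih ys hp' (fun h => hne (by rw [h]))⟩)

theorem pvMax_of_prefix (a b : List Char) (hp : a <+: b) (hne : a ≠ b) : pvMax a b = b := by
  simp [pvMax, pvLt_of_prefix a b hp hne]

theorem pvTrim_nil : pvTrim [] = [] := by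
  rw [pvTrim]; simp

-- B's while loop, one digit appended at the back
theorem pvTrim_append (p : List Char) (d : Char) :
    pvTrim (p ++ [d]) = if PySem.Int.mod (pvCharInt d) 2 ≠ 0 then pvTrim p else p ++ [d] := by
  rw [pvTrim]
  simp [PySem.List.pyGet?_neg_one_append_singleton, PySem.List.slice_to_neg_one]

theorem pvTrim_prefix (s : List Char) : pvTrim s <+: s := by
  induction s using pvTrim.induct with
  | case1 s h ih =>
    rw [pvTrim, dif_pos h]
    exact ih.trans (by simpa [PySem.List.slice_to_neg_one] using List.dropLast_prefix s)
  | case2 s h =>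
    rw [pvTrim, dif_neg h]

theorem pvGetD_set_self {α : Type} (xs : List α) (n : Nat) (h : n < xs.length) (v d : α) :
    (xs.set n v).getD n d = v := by
  simp [List.getD_eq_getElem?_getD, h]

theorem pvGetD_set_ne {α : Type} (xs : List α) (m n : Nat) (h : m ≠ n) (v d : α) :
    (xs.set n v).getD m d = xs.getD m d := by
  simp [List.getD_eq_getElem?_getD, Ne.symm h]

-- one outer iteration of A's DP, on a table whose relevant rows are known
theorem pvStepI_eq (S : List Char) (t : List (List (List Char))) (k : Nat) (a b : List Char)
    (ht : k + 1 < t.length)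
    (hrow : t.getD k [] = [a, b])
    (hnext : t.getD (k + 1) [] = [[], []]) :
    pvStepI S t ((k : Int) + 1) =
      t.set (k + 1)
        [pvMax a (a ++ [S.getD k ' ']),
         if PySem.Int.mod (pvCharInt (S.getD k ' ')) 2 = 0 then
           pvMax b (a ++ [S.getD k ' ']) else b] := by
  have hc : ((k : Int) + 1) = ((k + 1 : Nat) : Int) := by push_cast; ring
  have hc1 : ((k + 1 : Nat) : Int) - 1 = (k : Int) := by push_cast; ring
  have hrange : PySem.List.pyRange 0 2 1 = [0, 1] := by decide
  have e0 : pvStepJ S ((k + 1 : Nat) : Int) t 0 =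
      t.set (k + 1) [pvMax a (a ++ [S.getD k ' ']), []] := by
    unfold pvStepJ pvSetCell pvCell
    rw [hc1]
    simp only [PySem.List.pyGetD_natCast, PySem.List.pySetD_natCast, hrow, hnext]
    simp only [pvGetD_set_self t (k+1) ht, pvGetD_set_ne t k (k+1) (by omega), hrow]
    simp [PySem.List.pySetD_of_nonneg, PySem.List.pyGetD_of_nonneg, List.getD]
  have e1 : pvStepJ S ((k + 1 : Nat) : Int)
        (t.set (k + 1) [pvMax a (a ++ [S.getD k ' ']), []]) 1 =
      t.set (k + 1)
        [pvMax a (a ++ [S.getD k ' ']),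
         if PySem.Int.mod (pvCharInt (S.getD k ' ')) 2 = 0 then
           pvMax b (a ++ [S.getD k ' ']) else b] := by
    unfold pvStepJ pvSetCell pvCell
    rw [hc1]
    simp only [PySem.List.pyGetD_natCast, PySem.List.pySetD_natCast, List.set_set,
      pvGetD_set_self t (k+1) ht, pvGetD_set_ne t k (k+1) (by omega), hrow]
    simp [PySem.List.pySetD_of_nonneg, PySem.List.pyGetD_of_nonneg, List.getD]
    split <;> rfl
  unfold pvStepI
  rw [hrange]
  simp only [List.foldl_cons, List.foldl_nil]
  rw [hc, e0, e1]

-- the loop invariant: after the first k outer iterations row k holds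
-- (take k S, pvTrim (take k S)) and every later row is still untouched
theorem pv_dp_inv (S : List Char) (k : Nat) (hk : k ≤ S.length) :
    ((PySem.List.pyRange 1 ((k : Int) + 1) 1).foldl (pvStepI S)
        (List.replicate (S.length + 1) (List.replicate 2 []))).length = S.length + 1 ∧
    ((PySem.List.pyRange 1 ((k : Int) + 1) 1).foldl (pvStepI S)
        (List.replicate (S.length + 1) (List.replicate 2 []))).getD k [] =
      [S.take k, pvTrim (S.take k)] ∧
    ∀ m : Nat, k < m → m ≤ S.length →
      ((PySem.List.pyRange 1 ((k : Int) + 1) 1).foldl (pvStepI S)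
          (List.replicate (S.length + 1) (List.replicate 2 []))).getD m [] =
        List.replicate 2 [] := by
  induction k with
  | zero =>
    rw [PySem.List.pyRange_one_eq_nil (by norm_num)]
    refine ⟨by simp, ?_, ?_⟩
    · simp [List.getD_eq_getElem?_getD, pvTrim_nil]
    · intro m h1 h2
      have hm : m < S.length + 1 := by omega
      simp [List.getD_eq_getElem?_getD, hm]
  | succ k ih =>
    have hk' : k ≤ S.length := by omega
    obtain ⟨hlen, hrow, hrest⟩ := ih hk'
    have hklen : k < S.length := by omega
    have htake : S.take (k + 1) = S.take k ++ [S.getD k ' '] := by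
      rw [List.take_add_one]
      simp [List.getElem?_eq_getElem hklen, List.getD_eq_getElem?_getD]
    have hc : ((k + 1 : Nat) : Int) + 1 = ((k : Int) + 1) + 1 := by push_cast; ring
    rw [hc, PySem.List.pyRange_one_succ_right (by omega), List.foldl_append]
    simp only [List.foldl_cons, List.foldl_nil]
    set t := (PySem.List.pyRange 1 ((k : Int) + 1) 1).foldl (pvStepI S)
      (List.replicate (S.length + 1) (List.replicate 2 [])) with hT
    have htl : k + 1 < t.length := by rw [hlen]; omega
    rw [pvStepI_eq S t k _ _ htl hrow
      (by simpa using hrest (k + 1) (by omega) (by omega))]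
    refine ⟨by simp [hlen], ?_, ?_⟩
    · rw [pvGetD_set_self t (k+1) htl]
      have hpref1 : S.take k <+: S.take k ++ [S.getD k ' '] := List.prefix_append _ _
      have hne1 : S.take k ≠ S.take k ++ [S.getD k ' '] := by
        intro h
        have := congrArg List.length h
        simp at this
      have hpref2 : pvTrim (S.take k) <+: S.take k ++ [S.getD k ' '] :=
        (pvTrim_prefix _).trans (List.prefix_append _ _)
      have hne2 : pvTrim (S.take k) ≠ S.take k ++ [S.getD k ' '] := by
        intro h
        have h1 := congrArg List.length h
        have h2 := (pvTrim_prefix (S.take k)).length_le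
        rw [List.length_append, List.length_cons, List.length_nil] at h1
        omega
      rw [pvMax_of_prefix _ _ hpref1 hne1, htake, pvTrim_append]
      by_cases hev : PySem.Int.mod (pvCharInt (S.getD k ' ')) 2 = 0
      · rw [if_pos hev, if_neg (by simpa using hev), pvMax_of_prefix _ _ hpref2 hne2]
      · rw [if_neg hev, if_pos hev]
    · intro m h1 h2
      rw [pvGetD_set_ne t m (k+1) (by omega)]
      exact hrest m (by omega) h2

-- the two ports build the same sorted unique-digit list
theorem pv_same_list (str1 str2 : String) :
    PySem.Set.ofList (str1.toList.filter PySem.Chars.isdigit ++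
        str2.toList.filter PySem.Chars.isdigit) =
      PySem.Set.ofList ((str1.toList ++ str2.toList).filter PySem.Chars.isdigit) := by
  rw [List.filter_append]

theorem pv_result_eq (str1 str2 : String) :
    longest_even_number str1 str2 = longest_even_number_alt str1 str2 := by
  unfold longest_even_number longest_even_number_alt
  rw [← pv_same_list]
  set S : List Char :=
    PySem.List.sorted
      (PySem.Set.ofList (str1.toList.filter PySem.Chars.isdigit ++
        str2.toList.filter PySem.Chars.isdigit) : List Char) (fun c => c) true with hS
  obtain ⟨hlen, hrow, -⟩ := pv_dp_inv S S.length (le_refl _)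
  simp only [pvCell]
  rw [PySem.List.pyGetD_natCast, hrow, List.take_length]
  rfl

theorem longest_even_number_spec : Claim_equal_longest_even_number := by
  intro str1 str2 _
  unfold Spec_longest_even_number
  exact pv_result_eq str1 str2
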